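-- pv_equiv track=rewrite | github.com/joeytzt/AB1-Batch-Annotator | app.py | oframe
-- ===== SOURCE A (Python) =====
-- def oframe(amino):
--     oframes = []
--     for i in range(len(amino)):
--         if amino[i] == 'M':
--             temp = amino[i:]
--             stop = temp.find('_')
--             if stop != -1:
--                 oframes.append(temp[:stop+1])
--             else:
--                 oframes.append(temp)
--     return oframes
-- ===== SOURCE B (Python) =====
-- def oframe(amino):
--     oframes = []
--     rcur = []  # current ORF, stored reversed
--     for c in reversed(amino):
--         if c == "_":
--             rcur = ["_"]
--         else:
--             rcur.append(c)
--         if c == "M":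
--             oframes.append("".join(reversed(rcur)))
--     oframes.reverse()
--     return oframes
-- ===== Notes on version B (the rewrite author's own statement) =====
-- stated objective: alternative
-- what changed: Replaces A's forward index loop that rescans each suffix with find('_') and slices it, by a single right-to-left pass that carries the current ORF (reset at '_', extended otherwise) and materialises it at each 'M'.
import Mathlib
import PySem

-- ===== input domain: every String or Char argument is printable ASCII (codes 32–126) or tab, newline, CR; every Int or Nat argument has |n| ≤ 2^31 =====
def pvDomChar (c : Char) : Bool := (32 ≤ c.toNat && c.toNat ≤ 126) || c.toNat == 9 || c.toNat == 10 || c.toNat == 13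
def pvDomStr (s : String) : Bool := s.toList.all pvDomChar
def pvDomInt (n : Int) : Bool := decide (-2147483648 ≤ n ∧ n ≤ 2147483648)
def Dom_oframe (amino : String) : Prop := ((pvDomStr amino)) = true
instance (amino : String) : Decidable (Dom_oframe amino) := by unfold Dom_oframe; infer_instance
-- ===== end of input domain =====

-- B replaces A's per-'M' forward rescan (find + slice) by a single right-to-left pass that
-- carries the current ORF and collects it at each 'M' (objective: alternative decomposition).

-- ===== PORT A =====
def oframe (amino : String) : List String :=
  (PySem.List.pyRange 0 (PySem.Str.len amino) 1).foldl (fun oframes i =>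
    if PySem.Str.pyGet? amino i = some 'M' then
      let temp := PySem.Str.slice amino (some i) none
      let stop := PySem.Str.find temp "_"
      if stop ≠ -1 then oframes ++ [PySem.Str.slice temp none (some (stop + 1))]
      else oframes ++ [temp]
    else oframes) []

-- ===== PORT B =====
def oframe_alt (amino : String) : List String :=
  ((amino.toList.reverse.foldl (fun (st : List Char × List String) c =>
      let rcur := if c = '_' then ['_'] else st.1 ++ [c]
      (rcur, if c = 'M' then st.2 ++ [String.ofList rcur.reverse] else st.2)) ([], [])).2).reverse

-- ===== PRECONDITION & SPEC =====
def Spec_oframe (amino : String) (out : List String) : Prop := out = oframe_alt amino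
instance (amino : String) (out : List String) : Decidable (Spec_oframe amino out) := by unfold Spec_oframe; infer_instance

-- ===== CLAIM (what is proved, stated in full; the proofs are below) =====
def Claim_equal_oframe : Prop := ∀ (amino : String), Dom_oframe amino → Spec_oframe amino (oframe amino)

-- ===== LEMMAS AND PROOFS =====

/-- The ORF starting at the head of `s`: up to and including the first `'_'`, or all of `s`. -/
def curSpec (s : List Char) : List Char :=
  s.takeWhile (· ≠ '_') ++ (if '_' ∈ s then ['_'] else [])

/-- The list of ORFs of `s`, one per `'M'`, in left-to-right order. -/
def bSpec : List Char → List String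
  | [] => []
  | c :: rest => if c = 'M' then String.ofList (curSpec (c :: rest)) :: bSpec rest else bSpec rest

theorem split_at_stop (s : List Char) (h : '_' ∈ s) : ∃ r, s = s.takeWhile (· ≠ '_') ++ '_' :: r := by
  have hd : s.dropWhile (· ≠ '_') ≠ [] := by
    intro he
    have h2 := List.takeWhile_append_dropWhile (p := (· ≠ '_')) (l := s)
    rw [he, List.append_nil] at h2
    have := List.takeWhile_eq_self_iff.mp h2 '_' h
    simp at this
  obtain ⟨a, r, ha⟩ := List.exists_cons_of_ne_nil hd
  have hhead : a = '_' := by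
    have h3 := List.head_dropWhile_not (p := (· ≠ '_')) hd
    simp only [ha, List.head_cons] at h3
    simpa using h3
  refine ⟨r, ?_⟩
  conv_lhs => rw [← List.takeWhile_append_dropWhile (p := (· ≠ '_')) (l := s)]
  rw [ha, hhead]

/-- `find` locates the first `'_'`: its index is the length of the `(· ≠ '_')` prefix. -/
theorem find_stop (s : List Char) (h : '_' ∈ s) :
    PySem.Chars.find s ['_'] = (s.takeWhile (· ≠ '_')).length := by
  set t := s.takeWhile (· ≠ '_') with ht
  obtain ⟨r, hs⟩ := split_at_stop s h
  have h0 : 0 ≤ PySem.Chars.find s ['_'] :=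
    (PySem.Chars.find_nonneg_iff s ['_']).mpr ((List.singleton_infix_iff '_' s).mpr h)
  obtain ⟨hpre, hmin⟩ := PySem.Chars.find_spec h0
  set j := (PySem.Chars.find s ['_']).toNat with hj
  have hle : j ≤ t.length := by
    by_contra hgt
    exact hmin t.length (by omega) (by rw [hs, List.drop_left]; exact ⟨r, rfl⟩)
  have hge : ¬ j < t.length := by
    intro hlt
    rw [hs, List.drop_append_of_le_length (by omega)] at hpre
    obtain ⟨b, u, hb⟩ := List.exists_cons_of_ne_nil (l := t.drop j)
      (by intro he; have := congrArg List.length he; simp at this; omega)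
    rw [hb] at hpre
    obtain ⟨w, hw⟩ := hpre
    have hbu : b = '_' := by simpa using congrArg List.head? hw.symm
    have hbt : b ∈ t := List.mem_of_mem_drop (i := j) (by rw [hb]; exact List.mem_cons_self)
    have := List.mem_takeWhile_imp (ht ▸ hbt)
    simp [hbu] at this
  omega

theorem takeWhile_of_not_mem (s : List Char) (h : '_' ∉ s) : s.takeWhile (· ≠ '_') = s := by
  rw [List.takeWhile_eq_self_iff]
  intro c hc
  simp only [ne_eq, decide_eq_true_eq]
  rintro rfl; exact h hc

theorem curSpec_cons (c : Char) (s : List Char) :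
    curSpec (c :: s) = if c = '_' then ['_'] else c :: curSpec s := by
  unfold curSpec
  by_cases hc : c = '_'
  · simp [hc]
  · simp [hc, Ne.symm hc]

/-- A's per-`M` computation (on lists) produces exactly `curSpec`. -/
theorem aElem_eq (s : List Char) :
    (if PySem.Chars.find s ['_'] ≠ -1 then
        PySem.List.slice s none (some (PySem.Chars.find s ['_'] + 1))
      else s) = curSpec s := by
  by_cases hm : '_' ∈ s
  · have hf := find_stop s hm
    set t := s.takeWhile (· ≠ '_') with ht
    obtain ⟨r, hs⟩ := split_at_stop s hm
    rw [if_pos (by rw [hf]; omega), hf, PySem.List.slice_to s (by omega)]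
    have h1 : ((t.length : Int) + 1).toNat = t.length + 1 := by omega
    rw [h1]
    unfold curSpec
    rw [if_pos hm, ← ht]
    conv_lhs => rw [hs]
    exact List.take_length_add_append 1
  · have hf : PySem.Chars.find s ['_'] = -1 :=
      (PySem.Chars.find_eq_neg_one_iff s ['_']).mpr
        (fun hinf => hm ((List.singleton_infix_iff '_' s).mp hinf))
    rw [if_neg (by simp [hf])]
    unfold curSpec
    rw [if_neg hm, takeWhile_of_not_mem s hm, List.append_nil]

/-- A, reformulated on lists, equals `bSpec`. -/
theorem a_main (s : List Char) :
    ((List.range s.length).filter (fun k => s[k]? = some 'M')).map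
        (fun k => String.ofList (curSpec (s.drop k))) = bSpec s := by
  induction s with
  | nil => simp [bSpec]
  | cons c rest ih =>
    rw [List.length_cons, List.range_succ_eq_map]
    simp only [List.filter_cons, List.filter_map]
    by_cases hc : c = 'M' <;>
      simp [hc, bSpec, Function.comp_def] <;> exact ih

theorem b_fold (s : List Char) :
    s.foldr (fun c (st : List Char × List String) =>
        (if c = '_' then ['_'] else st.1 ++ [c],
         if c = 'M' then st.2 ++ [String.ofList (if c = '_' then ['_'] else st.1 ++ [c]).reverse] else st.2))
      ([], []) = ((curSpec s).reverse, (bSpec s).reverse) := by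
  induction s with
  | nil => simp [curSpec, bSpec]
  | cons c rest ih =>
    simp only [List.foldr_cons, ih, curSpec_cons, bSpec]
    by_cases hc : c = 'M' <;> by_cases hu : c = '_' <;> simp [hc, hu]

theorem oframe_alt_eq (amino : String) : oframe_alt amino = bSpec amino.toList := by
  unfold oframe_alt
  rw [List.foldl_reverse]
  simp only [b_fold]
  simp

set_option maxHeartbeats 1000000 in
theorem oframe_eq (amino : String) : oframe amino = bSpec amino.toList := by
  unfold oframe
  rw [PySem.Str.len_eq, PySem.List.pyRange_one]
  simp only [sub_zero, Int.toNat_natCast, zero_add, List.foldl_map]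
  refine Eq.trans (PySem.List.foldl_congr_mem _ _
      (fun (oframes : List String) (k : Nat) =>
        if (fun k => decide (amino.toList[k]? = some 'M')) k = true then
          oframes ++ [(fun k => String.ofList (curSpec (amino.toList.drop k))) k]
        else oframes) _ ?_)
      (by rw [PySem.List.foldl_append_if, List.nil_append, a_main])
  simp only [PySem.Str.pyGet?_natCast, decide_eq_true_eq]
  intro acc k _
  by_cases hM : amino.toList[k]? = some 'M'
  · rw [if_pos hM, if_pos hM]
    have htemp : (PySem.Str.slice amino (some (k : Int)) none).toList = amino.toList.drop k := by
      rw [PySem.Str.toList_slice, PySem.Chars.slice_eq_listSlice, PySem.List.slice_from_natCast]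
    have hfind : PySem.Str.find (PySem.Str.slice amino (some (k : Int)) none) "_"
        = PySem.Chars.find (amino.toList.drop k) ['_'] := by
      rw [PySem.Str.find_eq, htemp]; rfl
    have helem := aElem_eq (amino.toList.drop k)
    by_cases hst : PySem.Chars.find (amino.toList.drop k) ['_'] ≠ -1
    · rw [if_pos (by rw [hfind]; exact hst)]
      rw [if_pos hst] at helem
      congr 1
      rw [← helem, ← String.ofList_toList (s := PySem.Str.slice (PySem.Str.slice amino (some (k : Int)) none) none (some (PySem.Str.find (PySem.Str.slice amino (some (k : Int)) none) "_" + 1)))]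
      rw [PySem.Str.toList_slice, PySem.Chars.slice_eq_listSlice, htemp, hfind]
    · rw [if_neg (by rw [hfind]; exact hst)]
      rw [if_neg hst] at helem
      congr 1
      rw [← helem, ← String.ofList_toList (s := PySem.Str.slice amino (some (k : Int)) none), htemp]
  · rw [if_neg hM, if_neg hM]

-- ===== VERDICT (by name: the statement is the Claim_ definition above) =====
theorem oframe_spec : Claim_equal_oframe := by
  intro amino _
  unfold Spec_oframe
  rw [oframe_eq, oframe_alt_eq]
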